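-- pv_equiv track=rewrite | github.com/AlexValder/intellectual-analysis-labs | lab06/py_lab/main.py | count_series
-- ===== SOURCE A (Python) =====
-- from typing import List
--
-- def count_series(_input: List) -> int:
--     if len(_input) < 2:
--         return 1
--
--     count = 1
--     for i in range(len(_input) - 1):
--         if _input[i] != _input[i + 1]:
--             count += 1
--     return count
-- ===== SOURCE B (Python) =====
-- from typing import List
--
-- def count_series(_input: List) -> int:
--     if len(_input) < 2:
--         return 1
--
--     count = 0
--     i = 0
--     n = len(_input)
--     while i < n:
--         x = _input[i]
--         i += 1
--         while i < n and _input[i] == x: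
--             i += 1
--         count += 1
--     return count
-- ===== Notes on version B (the rewrite author's own statement) =====
-- stated objective: alternative
-- what changed: Replaces the adjacent-pair comparison accumulator (count of indices i with a[i] != a[i+1], starting at 1) by a run-skipping scan that takes each run's head and skips its equal successors, counting one per run.
import Mathlib
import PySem

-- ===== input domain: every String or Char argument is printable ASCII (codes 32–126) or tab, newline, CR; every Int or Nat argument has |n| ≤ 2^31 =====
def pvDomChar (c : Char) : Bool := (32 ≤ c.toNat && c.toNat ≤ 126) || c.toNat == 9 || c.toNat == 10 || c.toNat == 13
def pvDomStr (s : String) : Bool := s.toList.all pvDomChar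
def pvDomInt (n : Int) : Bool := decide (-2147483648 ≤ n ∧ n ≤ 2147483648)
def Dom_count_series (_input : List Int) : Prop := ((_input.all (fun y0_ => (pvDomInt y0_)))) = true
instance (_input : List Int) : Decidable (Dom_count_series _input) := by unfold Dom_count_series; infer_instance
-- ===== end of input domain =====

-- B replaces A's adjacent-pair comparison accumulator by a run-skipping scan (one count per run); same cost, different traversal.

-- ===== PORT A =====
-- the for-loop over range(len-1): indices are nonnegative and in range, so List.getElem? is exact for _input[i]
def count_series (_input : List Int) : Int :=
  if _input.length < 2 then 1
  else
    (List.range (_input.length - 1)).foldl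
      (fun count i => if _input[i]? ≠ _input[i + 1]? then count + 1 else count) 1

-- ===== PORT B =====
-- inner while-loop: skip the elements equal to the current run's head
def dropRunCS (x : Int) : List Int → List Int
  | [] => []
  | y :: ys => if y = x then dropRunCS x ys else y :: ys

theorem dropRunCS_length_le (x : Int) (ys : List Int) : (dropRunCS x ys).length ≤ ys.length := by
  induction ys with
  | nil => simp [dropRunCS]
  | cons y ys ih =>
    by_cases h : y = x
    · simp [dropRunCS, h]; omega
    · simp [dropRunCS, h]

-- outer while-loop: one count per run
def runsCS : List Int → Int
  | [] => 0
  | x :: xs => 1 + runsCS (dropRunCS x xs)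
termination_by xs => xs.length
decreasing_by
  have := dropRunCS_length_le x xs
  simp only [List.length_cons]; omega

def count_series_alt (_input : List Int) : Int :=
  if _input.length < 2 then 1 else runsCS _input

-- ===== PRECONDITION & SPEC =====
def Spec_count_series (_input : List Int) (out : Int) : Prop := out = count_series_alt _input
instance (_input : List Int) (out : Int) : Decidable (Spec_count_series _input out) := by unfold Spec_count_series; infer_instance

-- ===== CLAIM (what is proved, stated in full; the proofs are below) =====
def Claim_equal_count_series : Prop := ∀ (_input : List Int), Dom_count_series _input → Spec_count_series _input (count_series _input)

-- ===== LEMMAS AND PROOFS =====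

-- number of adjacent unequal pairs, structurally
def adjCS : List Int → Int
  | [] => 0
  | [_] => 0
  | x :: y :: t => (if x ≠ y then 1 else 0) + adjCS (y :: t)

theorem runsCS_dropRun (xs : List Int) : ∀ x : Int, runsCS (dropRunCS x xs) = adjCS (x :: xs) := by
  induction xs with
  | nil => intro x; simp [dropRunCS, runsCS, adjCS]
  | cons y t ih =>
    intro x
    by_cases h : y = x
    · subst h
      have hd : dropRunCS y (y :: t) = dropRunCS y t := by simp [dropRunCS]
      rw [hd, ih y]
      simp [adjCS]
    · have hd : dropRunCS x (y :: t) = y :: t := by simp [dropRunCS, h]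
      have hxy : x ≠ y := fun hh => h hh.symm
      rw [hd, show runsCS (y :: t) = 1 + runsCS (dropRunCS y t) from by simp [runsCS], ih y]
      simp [adjCS, hxy]

theorem runsCS_eq (x : Int) (xs : List Int) : runsCS (x :: xs) = 1 + adjCS (x :: xs) := by
  rw [show runsCS (x :: xs) = 1 + runsCS (dropRunCS x xs) from by simp [runsCS], runsCS_dropRun]

theorem foldA_eq (xs : List Int) : ∀ c : Int,
    (List.range (xs.length - 1)).foldl
      (fun count i => if xs[i]? ≠ xs[i + 1]? then count + 1 else count) c
    = c + adjCS xs := by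
  match xs with
  | [] => intro c; simp [adjCS]
  | [x] => intro c; simp [adjCS]
  | x :: y :: t =>
    intro c
    have hlen : (x :: y :: t).length - 1 = (y :: t).length - 1 + 1 := by
      simp
    rw [hlen, List.range_succ_eq_map]
    simp only [List.foldl_cons, List.foldl_map]
    have hstep : ∀ (i : ℕ), (x :: y :: t)[i + 1]? = (y :: t)[i]? := by
      intro i; rfl
    have hbody : (List.range ((y :: t).length - 1)).foldl
        (fun count i => if (x :: y :: t)[i + 1]? ≠ (x :: y :: t)[i + 1 + 1]? then count + 1 else count)
        (if (x :: y :: t)[0]? ≠ (x :: y :: t)[0 + 1]? then c + 1 else c)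
      = (List.range ((y :: t).length - 1)).foldl
        (fun count i => if (y :: t)[i]? ≠ (y :: t)[i + 1]? then count + 1 else count)
        (if (x :: y :: t)[0]? ≠ (x :: y :: t)[1]? then c + 1 else c) := by
      apply PySem.List.foldl_congr_mem
      intro a b _; simp [hstep]
    rw [hbody, foldA_eq (y :: t)]
    by_cases hxy : x = y
    · simp [adjCS, hxy]
    · simp [adjCS, hxy]
      ring

-- ===== VERDICT (by name: the statement is the Claim_ definition above) =====
theorem count_series_spec : Claim_equal_count_series := by
  intro xs _
  unfold Spec_count_series count_series count_series_alt
  by_cases h : xs.length < 2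
  · simp [h]
  · simp only [if_neg h]
    match xs with
    | [] => exact absurd (by simp) h
    | [x] => exact absurd (by simp) h
    | x :: y :: t =>
      rw [foldA_eq, runsCS_eq]
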